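-- pv_equiv track=rewrite | github.com/cs-vsu-ru/site-api | parser/app/lessons/services/parser.py | _get_weekday
-- ===== SOURCE A (Python) =====
-- def _get_weekday(row: int) -> int:
--     intervals = {
--         (4, 19): 0,
--         (21, 36): 1,
--         (38, 53): 2,
--         (55, 70): 3,
--         (72, 87): 4,
--         (89, 102): 5,
--     }
--     for interval, weekday in intervals.items():
--         if interval[0] <= row <= interval[1]:
--             return weekday
--     raise ValueError(row)
-- ===== SOURCE B (Python) =====
-- def _get_weekday(row: int) -> int:
--     offset = row - 4
--     q, r = divmod(offset, 17)
--     if 0 <= offset <= 98 and r <= 15: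
--         return q
--     raise ValueError(row)
-- ===== Notes on version B (the rewrite author's own statement) =====
-- stated objective: simpler
-- what changed: Replaces the six-interval dict scan with a single divmod by 17: weekday = (row-4)//17, valid iff 0 <= row-4 <= 98 and (row-4)%17 <= 15.
import Mathlib
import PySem

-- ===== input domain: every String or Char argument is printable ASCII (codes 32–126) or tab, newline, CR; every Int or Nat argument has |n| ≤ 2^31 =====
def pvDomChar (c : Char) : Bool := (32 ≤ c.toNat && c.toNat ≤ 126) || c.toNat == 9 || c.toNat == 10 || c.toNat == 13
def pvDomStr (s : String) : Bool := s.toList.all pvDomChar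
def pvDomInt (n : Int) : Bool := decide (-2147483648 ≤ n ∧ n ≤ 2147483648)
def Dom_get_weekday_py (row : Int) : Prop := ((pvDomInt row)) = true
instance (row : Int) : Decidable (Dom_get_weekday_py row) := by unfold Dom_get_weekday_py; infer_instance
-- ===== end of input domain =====

-- B replaces the six-interval dict scan with one divmod by 17; objective: simpler.
-- Both programs raise ValueError on rows outside the intervals; Pre_ excludes exactly those.

-- ===== PORT A =====
-- literal transliteration of the dict iteration: six interval checks in insertion
-- order; the final `raise ValueError(row)` branch is excluded by Pre_ (returns 0 there).
def get_weekday_py (row : Int) : Int :=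
  if 4 ≤ row ∧ row ≤ 19 then 0
  else if 21 ≤ row ∧ row ≤ 36 then 1
  else if 38 ≤ row ∧ row ≤ 53 then 2
  else if 55 ≤ row ∧ row ≤ 70 then 3
  else if 72 ≤ row ∧ row ≤ 87 then 4
  else if 89 ≤ row ∧ row ≤ 102 then 5
  else 0  -- raise ValueError(row): outside Pre_

-- ===== PORT B =====
def get_weekday_py_alt (row : Int) : Int :=
  let offset := row - 4
  let q := PySem.Int.floordiv offset 17
  let r := PySem.Int.mod offset 17
  if 0 ≤ offset ∧ offset ≤ 98 ∧ r ≤ 15 then q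
  else 0  -- raise ValueError(row): outside Pre_

-- ===== PRECONDITION & SPEC =====
-- Pre_ admits exactly the rows inside one of the six intervals; on all other rows
-- both A and B raise ValueError.
def Pre_get_weekday_py (row : Int) : Prop :=
  4 ≤ row ∧ row ≤ 102 ∧ PySem.Int.mod (row - 4) 17 ≤ 15
instance (row : Int) : Decidable (Pre_get_weekday_py row) := by
  unfold Pre_get_weekday_py; infer_instance
def pvWitness_get_weekday_py : Int := 42

def Spec_get_weekday_py (row : Int) (out : Int) : Prop := out = get_weekday_py_alt row
instance (row : Int) (out : Int) : Decidable (Spec_get_weekday_py row out) := by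
  unfold Spec_get_weekday_py; infer_instance

-- ===== CLAIM (what is proved, stated in full; the proofs are below) =====
def Claim_equal_get_weekday_py : Prop :=
  ∀ (row : Int), Dom_get_weekday_py row → Pre_get_weekday_py row →
    Spec_get_weekday_py row (get_weekday_py row)

-- ===== LEMMAS AND PROOFS =====

-- ===== VERDICT (by name: the statement is the Claim_ definition above) =====
theorem get_weekday_py_spec : Claim_equal_get_weekday_py := by
  intro row _ hpre
  obtain ⟨h1, h2, _⟩ := hpre
  have hpre' : Pre_get_weekday_py row := ⟨h1, h2, ‹_›⟩
  interval_cases row <;> revert hpre' <;> decide
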